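-- pv_equiv track=rewrite | github.com/pypi-data/pypi-mirror-72 | packages/pycatia/pycatia-0.3.5.tar.gz/pycatia-0.3.5/__reference_scripts__/helper_classes/class_text.py | pad_list
-- ===== SOURCE A (Python) =====
-- def sp(pad=4):
--
--     return " " * pad
--
-- def count_spaces_start(s):
--
--     n = 0
--
--     if s[0] != " ":
--         return n
--
--     for c in s:
--         if c == " ":
--             n += 1
--         if c != " ":
--             break
--
--     return n
--
-- def previous_line_padding(text):
--
--     post_pad = text.strip(" |")
--     pos = len(text) - len(post_pad)
--     previous_pad = text[:pos]
--
--     return previous_pad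
--
-- def split_line(line, pad_text=None, max_width=80, split_required=False):
--
--     if (len(line) + len(pad_text)) > max_width:
--         if " = " in line:
--             return pad_text + line + '\n'
--         if " : " in line:
--             return pad_text + line + '\n'
--         if " " in line:
--             pos = line[:max_width].rfind(" ")
--             start = line[:pos]
--             end = line[pos:].lstrip()
--             line = pad_text + start + '\n'
--             pad_text = previous_line_padding(line)
--             line = line + split_line(end, pad_text=pad_text, max_width=max_width, split_required=True)
--     else:
--         return pad_text + line + '\n'
--
--     return line
--
-- def pad_list(lines, pad=8, v=False, text=""):
--     """
--     returns string from list with padding.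
--     """
--
--     max_width = 80
--
--     p = ""
--
--     n = count_spaces_start(lines[0])
--
--     if v is True:
--         p = "| "
--
--     for line in lines:
--
--         pre_pad = sp(pad) + p
--         line = line.rstrip(" ")
--         line = line.rstrip(" ")
--
--         line = line[n:].strip('\n')
--         line = split_line(line, pad_text=pre_pad, max_width=max_width)
--
--         text = text + line
--
--     return text.rstrip(" |\n")
-- ===== SOURCE B (Python) =====
-- def _wrap(line, pad_text, max_width):
--     # iterative version of A's recursive split_line: accumulator + while loop
--     out = []
--     while len(line) + len(pad_text) > max_width:
--         if " = " in line or " : " in line: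
--             out.append(pad_text + line + "\n")
--             return "".join(out)
--         if " " not in line:
--             out.append(line)
--             return "".join(out)
--         pos = line[:max_width].rfind(" ")
--         emitted = pad_text + line[:pos] + "\n"
--         out.append(emitted)
--         pad_text = emitted[:len(emitted) - len(emitted.strip(" |"))]
--         line = line[pos:].lstrip()
--     out.append(pad_text + line + "\n")
--     return "".join(out)
--
--
-- def pad_list(lines, pad=8, v=False, text=""):
--     """returns string from list with padding."""
--     max_width = 80
--     first = lines[0]
--     n = len(first) - len(first.lstrip(" ")) if first[:1] == " " else 0
--     prefix = " " * pad + ("| " if v else "")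
--     pieces = [_wrap(raw.rstrip(" ")[n:].strip("\n"), prefix, max_width)
--               for raw in lines]
--     return (text + "".join(pieces)).rstrip(" |\n")
-- ===== Notes on version B (the rewrite author's own statement) =====
-- stated objective: faster
-- what changed: split_line's tail recursion becomes an iterative while loop over a list-of-pieces accumulator joined once, count_spaces_start's counting loop becomes the arithmetic len - len(lstrip), and pad_list's repeated string concatenation becomes a list comprehension joined once.
import Mathlib
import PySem

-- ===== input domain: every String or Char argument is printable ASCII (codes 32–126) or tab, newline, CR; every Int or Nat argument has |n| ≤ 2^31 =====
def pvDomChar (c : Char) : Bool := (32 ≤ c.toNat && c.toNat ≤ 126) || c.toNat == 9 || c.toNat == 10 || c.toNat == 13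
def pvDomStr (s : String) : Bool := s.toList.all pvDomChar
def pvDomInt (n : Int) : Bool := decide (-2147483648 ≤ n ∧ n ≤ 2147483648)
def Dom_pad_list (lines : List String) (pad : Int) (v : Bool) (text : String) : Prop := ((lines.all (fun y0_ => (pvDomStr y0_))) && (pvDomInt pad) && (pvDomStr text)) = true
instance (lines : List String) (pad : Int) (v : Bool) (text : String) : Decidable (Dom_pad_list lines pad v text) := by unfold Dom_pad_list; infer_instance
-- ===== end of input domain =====

-- B rewrites A's recursive split_line as an iterative accumulator loop and builds the
-- result by join-of-pieces instead of repeated string concatenation (measured faster in a timing run).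

-- s.lstrip(chars) / s.rstrip(chars) for an explicit character set (exact: Python drops
-- every leading / trailing character that is a member of the set)
def pvLstripChars (cs chars : List Char) : List Char := cs.dropWhile (· ∈ chars)
def pvRstripChars (cs chars : List Char) : List Char := (cs.reverse.dropWhile (· ∈ chars)).reverse

-- ===== PORT A =====
-- helper count_spaces_start: the for-loop with its break (counts while chars are spaces)
def pvCountLoopA : List Char → Nat → Nat
  | [], n => n
  | c :: rest, n => if c = ' ' then pvCountLoopA rest (n + 1) else n

-- count_spaces_start(s); s[0] on an empty s raises IndexError (excluded by Pre_): none-case value is never used there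
def pvCountSpacesStartA (s : List Char) : Nat :=
  match PySem.List.pyGet? s 0 with
  | none => 0
  | some c => if c ≠ ' ' then 0 else pvCountLoopA s 0

-- previous_line_padding(text)
def pvPrevPadA (t : List Char) : List Char :=
  let post := PySem.Chars.stripChars t [' ', '|']
  let pos := t.length - post.length
  t.take pos

-- split_line(line, pad_text, max_width): structural recursion on fuel; each recursive call
-- strictly shortens line, so fuel = line.length + 1 is never exhausted (the 0-case is a guard)
def pvSplitLineA (fuel : Nat) (line pad_text : List Char) (max_width : Nat) : List Char :=
  match fuel with
  | 0 => []
  | f + 1 =>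
    if line.length + pad_text.length > max_width then
      if PySem.Chars.isIn (" = ".toList) line then pad_text ++ line ++ ['\n']
      else if PySem.Chars.isIn (" : ".toList) line then pad_text ++ line ++ ['\n']
      else if PySem.Chars.isIn [' '] line then
        let pos := PySem.Chars.rfind (PySem.List.slice line none (some (max_width : Int))) [' ']
        let start := PySem.List.slice line none (some pos)
        let endp := PySem.Chars.lstrip (PySem.List.slice line (some pos) none)
        let line2 := pad_text ++ start ++ ['\n']
        let pad2 := pvPrevPadA line2
        line2 ++ pvSplitLineA f endp pad2 max_width
      else line
    else pad_text ++ line ++ ['\n']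

def pad_list (lines : List String) (pad : Int) (v : Bool) (text : String) : String :=
  let max_width := 80
  let p : List Char := if v = true then "| ".toList else []
  -- lines[0] raises IndexError on an empty list (excluded by Pre_)
  let n := pvCountSpacesStartA ((PySem.List.pyGet? lines 0).getD "").toList
  let body := lines.foldl (fun acc l =>
      let pre_pad := PySem.List.pyRepeat [' '] pad ++ p
      let l1 := pvRstripChars l.toList [' ']
      let l2 := pvRstripChars l1 [' ']
      let l3 := PySem.Chars.stripChars (l2.drop n) ['\n']
      acc ++ pvSplitLineA (l3.length + 1) l3 pre_pad max_width) text.toList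
  String.mk (pvRstripChars body [' ', '|', '\n'])

-- ===== PORT B =====
-- _wrap: while-loop with a list-of-pieces accumulator, joined at each exit
def pvWrapLoopB (fuel : Nat) (out : List (List Char)) (line pad_text : List Char) (max_width : Nat) : List Char :=
  match fuel with
  | 0 => out.flatten
  | f + 1 =>
    if line.length + pad_text.length > max_width then
      if PySem.Chars.isIn (" = ".toList) line || PySem.Chars.isIn (" : ".toList) line then
        (out ++ [pad_text ++ line ++ ['\n']]).flatten
      else if !PySem.Chars.isIn [' '] line then
        (out ++ [line]).flatten
      else
        let pos := PySem.Chars.rfind (PySem.List.slice line none (some (max_width : Int))) [' ']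
        let emitted := pad_text ++ PySem.List.slice line none (some pos) ++ ['\n']
        let pad2 := emitted.take (emitted.length - (PySem.Chars.stripChars emitted [' ', '|']).length)
        pvWrapLoopB f (out ++ [emitted]) (PySem.Chars.lstrip (PySem.List.slice line (some pos) none)) pad2 max_width
    else (out ++ [pad_text ++ line ++ ['\n']]).flatten

def pad_list_alt (lines : List String) (pad : Int) (v : Bool) (text : String) : String :=
  let max_width := 80
  -- lines[0] raises IndexError on an empty list (excluded by Pre_)
  let first := ((PySem.List.pyGet? lines 0).getD "").toList
  let n := if first.take 1 = [' '] then first.length - (pvLstripChars first [' ']).length else 0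
  let pre : List Char := PySem.List.pyRepeat [' '] pad ++ (if v then "| ".toList else [])
  let pieces := lines.map (fun raw =>
      pvWrapLoopB ((PySem.Chars.stripChars ((pvRstripChars raw.toList [' ']).drop n) ['\n']).length + 1)
        [] (PySem.Chars.stripChars ((pvRstripChars raw.toList [' ']).drop n) ['\n']) pre max_width)
  String.mk (pvRstripChars (text.toList ++ pieces.flatten) [' ', '|', '\n'])

-- ===== PRECONDITION & SPEC =====
-- A raises IndexError when lines is empty (lines[0]) or when lines[0] is the empty string
-- (count_spaces_start reads s[0]); Pre_ excludes exactly those inputs.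
def Pre_pad_list (lines : List String) (pad : Int) (v : Bool) (text : String) : Prop :=
  lines ≠ [] ∧ lines.head? ≠ some ""
instance (lines : List String) (pad : Int) (v : Bool) (text : String) : Decidable (Pre_pad_list lines pad v text) := by unfold Pre_pad_list; infer_instance

def pvWitness_pad_list : List String × Int × Bool × String := (["  alpha beta", "  gamma = 1"], 8, true, "")

def Spec_pad_list (lines : List String) (pad : Int) (v : Bool) (text : String) (out : String) : Prop := out = pad_list_alt lines pad v text
instance (lines : List String) (pad : Int) (v : Bool) (text : String) (out : String) : Decidable (Spec_pad_list lines pad v text out) := by unfold Spec_pad_list; infer_instance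

-- ===== CLAIM (what is proved, stated in full; the proofs are below) =====
def Claim_equal_pad_list : Prop := ∀ (lines : List String) (pad : Int) (v : Bool) (text : String), Dom_pad_list lines pad v text → Pre_pad_list lines pad v text → Spec_pad_list lines pad v text (pad_list lines pad v text)
-- ===== LEMMAS AND PROOFS =====

-- the while loop with accumulator computes out.flatten ++ the recursion's result
theorem pvWrap_eq_split (fuel : Nat) : ∀ (out : List (List Char)) (line pad_text : List Char) (mw : Nat),
    pvWrapLoopB fuel out line pad_text mw = out.flatten ++ pvSplitLineA fuel line pad_text mw := by
  induction fuel with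
  | zero => intro out line pad_text mw; simp [pvWrapLoopB, pvSplitLineA]
  | succ f ih =>
    intro out line pad_text mw
    simp only [pvWrapLoopB, pvSplitLineA]
    split_ifs with h1 h2 h3 h4 <;>
      simp_all [pvPrevPadA, List.flatten_append, ih, List.append_assoc]

-- dropWhile is idempotent
theorem pvDropWhile_idem {α : Type} (p : α → Bool) (l : List α) :
    (l.dropWhile p).dropWhile p = l.dropWhile p := by
  induction l with
  | nil => simp
  | cons a l ih => by_cases h : p a <;> simp [h, ih]

-- A's doubled rstrip(" ") collapses
theorem pvRstrip_idem (cs chars : List Char) : pvRstripChars (pvRstripChars cs chars) chars = pvRstripChars cs chars := by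
  simp [pvRstripChars, pvDropWhile_idem]

-- A's counting loop counts the leading spaces
theorem pvCountLoopA_eq (s : List Char) : ∀ k, pvCountLoopA s k = k + (s.takeWhile (· = ' ')).length := by
  induction s with
  | nil => intro k; simp [pvCountLoopA]
  | cons c rest ih =>
    intro k
    by_cases h : c = ' ' <;> simp [pvCountLoopA, h, ih] <;> omega

-- A's count_spaces_start equals B's arithmetic formulation
theorem pvCount_eq (s : List Char) :
    pvCountSpacesStartA s = (if s.take 1 = [' '] then s.length - (pvLstripChars s [' ']).length else 0) := by
  cases s with
  | nil => simp [pvCountSpacesStartA, PySem.List.pyGet?, PySem.List.pyIdx?]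
  | cons c rest =>
    have hget : PySem.List.pyGet? (c :: rest) 0 = some c := by
      simp [PySem.List.pyGet?, PySem.List.pyIdx?]
    simp only [pvCountSpacesStartA, hget]
    by_cases h : c = ' '
    · subst h
      have hdw : ((' ' :: rest).takeWhile (· = ' ')).length + ((' ' :: rest).dropWhile (· = ' ')).length = (' ' :: rest).length := by
        rw [← List.length_append, List.takeWhile_append_dropWhile]
      simp only [pvLstripChars, List.mem_singleton, pvCountLoopA_eq, List.take]
      simp only [List.dropWhile_cons, List.takeWhile_cons, decide_true, if_true,
        List.length_cons, decide_eq_true_eq] at hdw ⊢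
      simp
      omega
    · simp [h, List.take]

-- a foldl that only appends is text ++ flatten of the per-element pieces
theorem pvFoldlAppend (g : String → List Char) (lines : List String) : ∀ (acc : List Char),
    lines.foldl (fun acc l => acc ++ g l) acc = acc ++ (lines.map g).flatten := by
  induction lines with
  | nil => simp
  | cons l rest ih => intro acc; simp [List.foldl_cons, ih, List.append_assoc]

-- ===== VERDICT (by name: the statement is the Claim_ definition above) =====
theorem pad_list_spec : Claim_equal_pad_list := by
  intro lines pad v text _ _
  show pad_list lines pad v text = pad_list_alt lines pad v text
  unfold pad_list pad_list_alt
  simp only []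
  rw [pvFoldlAppend]
  simp only [pvCount_eq]
  congr 2
  congr 1
  exact congrArg List.flatten (List.map_congr_left (fun raw _ => by
    rw [pvWrap_eq_split]
    simp [pvRstrip_idem]))
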